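-- pv_equiv track=rewrite | github.com/Cesarbautista10/devlab_mini_2 | info/scripts/generate_docs_backup.py | adjust_software_header_levels
-- ===== SOURCE A (Python) =====
-- def adjust_software_header_levels(content: str, abstract_content: str = "") -> str:
--     """Ajusta los niveles de headers del software README para la jerarquía correcta"""
--     # Como ya añadimos \section{SOFTWARE DOCUMENTATION} externamente,
--     # necesitamos eliminar el primer header principal y ajustar todos los niveles
--     # para que empiecen desde ## (subsection)
--
--     lines = content.split('\n')
--     processed_lines = []
--     first_header_found = False
--
--     # Añadir Abstract si se proporciona
--     if abstract_content:
--         processed_lines.append("## Abstract")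
--         processed_lines.append("")
--         processed_lines.append(abstract_content)
--         processed_lines.append("")
--
--     for line in lines:
--         # Eliminar el primer header principal ya que será reemplazado por \section{}
--         if line.startswith('# ') and not first_header_found:
--             first_header_found = True
--             continue  # Saltar esta línea
--
--         # Ajustar todos los headers para que estén en el nivel correcto
--         # ## permanece como ## (\subsection)
--         # ### permanece como ### (\subsubsection)
--         # #### permanece como #### (\paragraph)
--         processed_lines.append(line)
--
--     return '\n'.join(processed_lines)
-- ===== SOURCE B (Python) =====
-- def adjust_software_header_levels(content: str, abstract_content: str = "") -> str:
--     """String-level rewrite: locate the first '# ' header directly in the raw text with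
--     str.find and splice it out by substring concatenation; no line list is ever built."""
--     if content.startswith('# '):
--         nl = content.find('\n')
--         body = None if nl == -1 else content[nl + 1:]
--     else:
--         j = content.find('\n# ')
--         if j == -1:
--             body = content
--         else:
--             k = content.find('\n', j + 1)
--             body = content[:j] if k == -1 else content[:j] + content[k:]
--     prefix = "## Abstract\n\n" + abstract_content + "\n" if abstract_content else ""
--     if body is None:
--         return prefix
--     return prefix + "\n" + body if prefix else body
-- ===== Notes on version B (the rewrite author's own statement) =====
-- stated objective: alternative
-- what changed: B never splits the text into a line list: it locates the first top-level header directly in the raw string (startswith / find of '\n# '), splices it out with substring concatenation, and prepends the abstract block as one preformatted string.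
import Mathlib
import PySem

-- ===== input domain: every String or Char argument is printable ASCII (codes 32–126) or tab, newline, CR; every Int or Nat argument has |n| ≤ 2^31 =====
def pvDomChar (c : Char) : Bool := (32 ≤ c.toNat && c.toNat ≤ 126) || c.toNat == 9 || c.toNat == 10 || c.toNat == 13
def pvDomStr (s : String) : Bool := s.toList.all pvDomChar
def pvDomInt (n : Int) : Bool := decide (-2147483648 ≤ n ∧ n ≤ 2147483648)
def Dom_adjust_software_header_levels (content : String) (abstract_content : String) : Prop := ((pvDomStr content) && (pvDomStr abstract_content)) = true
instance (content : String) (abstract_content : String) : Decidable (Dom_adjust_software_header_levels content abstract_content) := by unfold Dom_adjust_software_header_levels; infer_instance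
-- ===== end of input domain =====

-- B locates the first '# ' header directly in the raw string (find '\n# ' / substring splicing) instead of A's split-into-lines flag loop; same cost, different algorithmic structure.


-- ===== PORT A =====
-- A's for-loop: accumulate processed_lines, skip the first '# ' line via the flag
def pvALoop : List String → List String → Bool → List String
  | [], acc, _ => acc
  | l :: ls, acc, found =>
    if PySem.Str.startswith l "# " = true ∧ found = false then
      pvALoop ls acc true
    else
      pvALoop ls (acc ++ [l]) found

def adjust_software_header_levels (content : String) (abstract_content : String) : String :=
  let lines := (PySem.Str.split? content "\n").getD []
  let processed := if abstract_content ≠ "" then ["## Abstract", "", abstract_content, ""] else []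
  PySem.Str.join "\n" (pvALoop lines processed false)

-- ===== PORT B =====
def adjust_software_header_levels_alt (content : String) (abstract_content : String) : String :=
  let body : Option String :=
    if PySem.Str.startswith content "# " then
      let nl := PySem.Str.find content "\n"
      if nl = -1 then none else some (PySem.Str.slice content (some (nl + 1)) none)
    else
      let j := PySem.Str.find content "\n# "
      if j = -1 then some content
      else
        let k := PySem.Str.findFrom content "\n" (j + 1) none
        if k = -1 then some (PySem.Str.slice content none (some j))
        else some (PySem.Str.slice content none (some j) ++ PySem.Str.slice content (some k) none)
  let pfx := if abstract_content ≠ "" then "## Abstract\n\n" ++ abstract_content ++ "\n" else ""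
  match body with
  | none => pfx
  | some b => if pfx ≠ "" then pfx ++ "\n" ++ b else b

-- ===== PRECONDITION & SPEC =====
def Spec_adjust_software_header_levels (content : String) (abstract_content : String) (out : String) : Prop := out = adjust_software_header_levels_alt content abstract_content
instance (content : String) (abstract_content : String) (out : String) : Decidable (Spec_adjust_software_header_levels content abstract_content out) := by unfold Spec_adjust_software_header_levels; infer_instance

-- ===== CLAIM (what is proved, stated in full; the proofs are below) =====
def Claim_equal_adjust_software_header_levels : Prop := ∀ (content : String) (abstract_content : String), Dom_adjust_software_header_levels content abstract_content → Spec_adjust_software_header_levels content abstract_content (adjust_software_header_levels content abstract_content)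

-- ===== LEMMAS AND PROOFS =====

-- reference splitter: mySplit cur cs = Python cs.split('\n') with reversed pending chunk cur
def mySplit (cur : List Char) : List Char → List (List Char)
  | [] => [cur.reverse]
  | c :: r => if c = '\n' then cur.reverse :: mySplit [] r else mySplit (c :: cur) r

-- the line-level effect of B's body computation
def spliceBody (L : List (List Char)) : Option (List Char) :=
  match L.findIdx? (fun l => PySem.Chars.startswith l ['#', ' ']) with
  | none => some (PySem.Chars.join ['\n'] L)
  | some i => if L.length = 1 then none
              else some (PySem.Chars.join ['\n'] (L.take i ++ L.drop (i + 1)))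

-- char-level mirror of B's body computation
def bBodyC (cs : List Char) : Option (List Char) :=
  if PySem.Chars.startswith cs ['#', ' '] then
    let nl := PySem.Chars.find cs ['\n']
    if nl = -1 then none else some (PySem.List.slice cs (some (nl + 1)) none)
  else
    let j := PySem.Chars.find cs ['\n', '#', ' ']
    if j = -1 then some cs
    else
      let k := PySem.Chars.findFrom cs ['\n'] (j + 1) none
      if k = -1 then some (PySem.List.slice cs none (some j))
      else some (PySem.List.slice cs none (some j) ++ PySem.List.slice cs (some k) none)

theorem go_spec (fuel : Nat) (l cur : List Char) (acc : List (List Char)) (h : l.length < fuel) :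
    PySem.Chars.splitOn.go ['\n'] fuel l cur acc = acc.reverse ++ mySplit cur l := by
  induction fuel generalizing l cur acc with
  | zero => omega
  | succ fuel ih =>
    cases l with
    | nil => simp [PySem.Chars.splitOn.go, mySplit]
    | cons c rest =>
      rw [PySem.Chars.splitOn.go]
      by_cases hc : c = '\n'
      · subst hc
        rw [if_pos (by simp [List.isPrefixOf])]
        simp only [List.length_cons] at h
        simp only [List.length_singleton, List.drop_one, List.tail_cons]
        rw [ih rest [] (cur.reverse :: acc) (by omega)]
        simp [mySplit]
      · rw [if_neg (by simp [List.isPrefixOf]; exact fun hh => hc hh.symm)]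
        simp only [List.length_cons] at h
        rw [ih rest (c :: cur) acc (by omega)]
        simp [mySplit, hc]

theorem splitOn_eq (cs : List Char) : PySem.Chars.splitOn cs ['\n'] = mySplit [] cs := by
  rw [PySem.Chars.splitOn, go_spec cs.length.succ cs [] [] (by omega)]
  simp

theorem mySplit_ne_nil (cur cs : List Char) : mySplit cur cs ≠ [] := by
  induction cs generalizing cur with
  | nil => simp [mySplit]
  | cons c r ih =>
    by_cases hc : c = '\n'
    · simp [mySplit, hc]
    · simpa [mySplit, hc] using ih (c :: cur)

theorem join_cons (a : List Char) (M : List (List Char)) (h : M ≠ []) :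
    PySem.Chars.join ['\n'] (a :: M) = a ++ '\n' :: PySem.Chars.join ['\n'] M := by
  cases M with
  | nil => simp at h
  | cons b rest => rw [PySem.Chars.join_cons_cons]; simp

theorem ic_mySplit (cs cur : List Char) :
    PySem.Chars.join ['\n'] (mySplit cur cs) = cur.reverse ++ cs := by
  induction cs generalizing cur with
  | nil => simp [mySplit, PySem.Chars.join_singleton]
  | cons c r ih =>
    by_cases hc : c = '\n'
    · subst hc
      rw [mySplit, if_pos rfl, join_cons _ _ (mySplit_ne_nil [] r), ih []]
      simp
    · rw [mySplit, if_neg hc, ih (c :: cur)]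
      simp

theorem mySplit_append (l : List Char) (hl : '\n' ∉ l) (cur r : List Char) :
    mySplit cur (l ++ '\n' :: r) = (cur.reverse ++ l) :: mySplit [] r := by
  induction l generalizing cur with
  | nil => simp [mySplit]
  | cons c t ih =>
    have hc : c ≠ '\n' := fun h => hl (h ▸ List.mem_cons_self ..)
    rw [List.cons_append, mySplit, if_neg hc, ih (fun h => hl (List.mem_cons_of_mem _ h)) (c :: cur)]
    simp

theorem mySplit_free (cs : List Char) (h : '\n' ∉ cs) (cur : List Char) :
    mySplit cur cs = [cur.reverse ++ cs] := by
  induction cs generalizing cur with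
  | nil => simp [mySplit]
  | cons c r ih =>
    have hc : c ≠ '\n' := fun hh => h (hh ▸ List.mem_cons_self ..)
    rw [mySplit, if_neg hc, ih (fun hh => h (List.mem_cons_of_mem _ hh)) (c :: cur)]
    simp

theorem nl_decomp (cs : List Char) (h : '\n' ∈ cs) :
    ∃ l r, cs = l ++ '\n' :: r ∧ '\n' ∉ l := by
  induction cs with
  | nil => simp at h
  | cons c t ih =>
    by_cases hc : c = '\n'
    · exact ⟨[], t, by simp [hc], by simp⟩
    · obtain ⟨l, r, rfl, hl⟩ := ih (List.mem_of_ne_of_mem (fun hh => hc hh.symm) h)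
      exact ⟨c :: l, r, rfl, by simp [hl]; exact fun hh => hc hh.symm⟩

theorem find_eq_of (cs sub : List Char) (j : Nat) (h1 : sub <+: cs.drop j)
    (h2 : ∀ i < j, ¬ sub <+: cs.drop i) : PySem.Chars.find cs sub = j := by
  have hin : PySem.Chars.isIn sub cs = true :=
    (PySem.Chars.exists_prefix_drop_iff_isIn sub cs).mp ⟨j, h1⟩
  have hnn : 0 ≤ PySem.Chars.find cs sub := by
    rw [PySem.Chars.find_nonneg_iff]
    exact (PySem.Chars.isIn_iff_infix sub cs).mp hin
  obtain ⟨hp, hmin⟩ := PySem.Chars.find_spec hnn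
  have hj : (PySem.Chars.find cs sub).toNat = j := by
    by_contra hne
    rcases Nat.lt_or_ge (PySem.Chars.find cs sub).toNat j with hlt | hge
    · exact h2 _ hlt hp
    · exact hmin j (lt_of_le_of_ne hge (Ne.symm hne)) h1
  omega

theorem no_nl_prefix (l rest t : List Char) (hl : '\n' ∉ l) (i : Nat) (hi : i < l.length) :
    ¬ ('\n' :: t) <+: (l ++ rest).drop i := by
  intro hp
  rw [List.drop_append_of_le_length (le_of_lt hi)] at hp
  have hd : l.drop i = l[i] :: l.drop (i + 1) := (List.drop_eq_getElem_cons hi)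
  rw [hd, List.cons_append] at hp
  rw [List.cons_prefix_cons] at hp
  exact hl (hp.1 ▸ l.getElem_mem hi)

theorem find_nl (l r : List Char) (hl : '\n' ∉ l) :
    PySem.Chars.find (l ++ '\n' :: r) ['\n'] = l.length := by
  refine find_eq_of _ _ _ ?_ ?_
  · rw [List.drop_left]
    exact ⟨r, rfl⟩
  · exact fun i hi => no_nl_prefix l _ [] hl i hi

theorem find_nl_neg (cs : List Char) (h : '\n' ∉ cs) :
    PySem.Chars.find cs ['\n'] = -1 := by
  rw [PySem.Chars.find_eq_neg_one_iff]
  exact fun hinf => h (hinf.subset (List.mem_singleton_self _))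

theorem find_sub3_neg_free (cs : List Char) (h : '\n' ∉ cs) :
    PySem.Chars.find cs ['\n', '#', ' '] = -1 := by
  rw [PySem.Chars.find_eq_neg_one_iff]
  exact fun hinf => h (hinf.subset (List.mem_cons_self ..))

theorem drop_app_cons (l r : List Char) (c : Char) (m : Nat) :
    (l ++ c :: r).drop (l.length + (m + 1)) = r.drop m := by
  rw [List.drop_append]; simp

theorem find_sub3_at (l r : List Char) (hl : '\n' ∉ l) (hr : ['#', ' '] <+: r) :
    PySem.Chars.find (l ++ '\n' :: r) ['\n', '#', ' '] = l.length := by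
  refine find_eq_of _ _ _ ?_ ?_
  · rw [List.drop_left, List.cons_prefix_cons]
    exact ⟨rfl, hr⟩
  · exact fun i hi => no_nl_prefix l _ ['#', ' '] hl i hi

theorem find_sub3_shift (l r : List Char) (hl : '\n' ∉ l) (hr : ¬ ['#', ' '] <+: r) :
    PySem.Chars.find (l ++ '\n' :: r) ['\n', '#', ' '] =
      if PySem.Chars.find r ['\n', '#', ' '] = -1 then -1
      else l.length + 1 + PySem.Chars.find r ['\n', '#', ' '] := by
  by_cases hneg : PySem.Chars.find r ['\n', '#', ' '] = -1
  · rw [if_pos hneg]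
    rw [PySem.Chars.find_eq_neg_one_iff] at hneg
    rw [PySem.Chars.find_eq_neg_one_iff]
    intro hinf
    have hin := (PySem.Chars.isIn_iff_infix _ _).mpr hinf
    obtain ⟨j, hp⟩ := (PySem.Chars.exists_prefix_drop_iff_isIn _ _).mpr hin
    rcases lt_trichotomy j l.length with hj | hj | hj
    · exact no_nl_prefix l _ ['#', ' '] hl j hj hp
    · subst hj
      rw [List.drop_left] at hp
      rw [List.cons_prefix_cons] at hp
      exact hr hp.2
    · have hj2 : j = l.length + ((j - l.length - 1) + 1) := by omega
      rw [hj2, drop_app_cons] at hp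
      exact hneg (hp.isInfix.trans (List.drop_suffix _ r).isInfix)
  · rw [if_neg hneg]
    have hnn : 0 ≤ PySem.Chars.find r ['\n', '#', ' '] := by
      rcases lt_or_ge (PySem.Chars.find r ['\n', '#', ' ']) 0 with hlt | hge
      · exact absurd (by have := PySem.Chars.neg_one_le_find r ['\n', '#', ' ']; omega) hneg
      · exact hge
    obtain ⟨hp, hmin⟩ := PySem.Chars.find_spec hnn
    set f := (PySem.Chars.find r ['\n', '#', ' ']).toNat with hfdef
    have heq : PySem.Chars.find (l ++ '\n' :: r) ['\n', '#', ' '] = (l.length + 1 + f : Nat) := by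
      refine find_eq_of _ _ _ ?_ ?_
      · have h3 : l.length + 1 + f = l.length + (f + 1) := by omega
        rw [h3, drop_app_cons]
        exact hp
      · intro i hi hpre
        rcases lt_trichotomy i l.length with hj | hj | hj
        · exact no_nl_prefix l _ ['#', ' '] hl i hj hpre
        · subst hj
          rw [List.drop_left, List.cons_prefix_cons] at hpre
          exact hr hpre.2
        · have hj2 : i = l.length + ((i - l.length - 1) + 1) := by omega
          rw [hj2, drop_app_cons] at hpre
          exact hmin (i - l.length - 1) (by omega) hpre
    rw [heq]
    push_cast
    rw [Int.toNat_of_nonneg hnn]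

theorem startswith_append_nl (l r : List Char) (hl : '\n' ∉ l) :
    (['#', ' '] <+: (l ++ '\n' :: r)) ↔ (['#', ' '] <+: l) := by
  match l, hl with
  | [], _ =>
    simp [List.cons_prefix_cons]
  | [a], hl =>
    simp [List.cons_prefix_cons]
  | a :: b :: t, _ =>
    simp [List.cons_prefix_cons]

theorem parts_no_header (r cur : List Char) (h1 : ¬ ['#', ' '] <+: cur.reverse ++ r)
    (h2 : ¬ ['\n', '#', ' '] <:+: r) :
    ∀ p ∈ mySplit cur r, ¬ (['#', ' '] <+: p) := by
  induction r generalizing cur with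
  | nil =>
    intro p hp
    rw [mySplit] at hp
    simp only [List.mem_singleton] at hp
    subst hp
    intro hpre
    exact h1 (hpre.trans (List.prefix_append _ _))
  | cons c t ih =>
    intro p hp
    by_cases hc : c = '\n'
    · subst hc
      rw [mySplit, if_pos rfl] at hp
      rcases List.mem_cons.mp hp with rfl | hp
      · intro hpre
        exact h1 (hpre.trans (List.prefix_append _ _))
      · refine ih [] ?_ ?_ p hp
        · intro hpre
          exact h2 ((List.cons_prefix_cons.mpr ⟨rfl, by simpa using hpre⟩ :
            ['\n', '#', ' '] <+: '\n' :: t).isInfix)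
        · intro hinf
          exact h2 (hinf.trans (List.suffix_cons '\n' t).isInfix)
    · rw [mySplit, if_neg hc] at hp
      refine ih (c :: cur) ?_ ?_ p hp
      · simpa using h1
      · intro hinf
        exact h2 (hinf.trans (List.suffix_cons c t).isInfix)

theorem spliceBody_cons (l : List Char) (L : List (List Char)) (X : List Char)
    (hP : PySem.Chars.startswith l ['#', ' '] = false)
    (hL : L ≠ []) (hs : spliceBody L = some X) :
    spliceBody (l :: L) = some (l ++ '\n' :: X) := by
  rw [spliceBody, List.findIdx?_cons, hP]
  simp only [Bool.false_eq_true, if_false]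
  rw [spliceBody] at hs
  cases hfi : L.findIdx? (fun l => PySem.Chars.startswith l ['#', ' ']) with
  | none =>
    rw [hfi] at hs
    simp only [Option.map_none] at ⊢
    dsimp only at hs ⊢
    injection hs with hs
    rw [join_cons l L hL, hs]
  | some i =>
    rw [hfi] at hs
    simp only [Option.map_some] at ⊢
    dsimp only at hs ⊢
    have hlen : L.length ≠ 1 := by
      intro h1
      rw [if_pos h1] at hs
      simp at hs
    rw [if_neg hlen] at hs
    simp only [Option.some.injEq] at hs
    have hilt : i < L.length := (List.findIdx?_eq_some_iff_findIdx_eq.mp hfi).1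
    have hlen2 : ¬ ((l :: L).length = 1) := by
      simp only [List.length_cons]
      intro hcon
      exact hL (List.length_eq_zero_iff.mp (by omega))
    rw [if_neg hlen2]
    have htd : (l :: L).take (i + 1) ++ (l :: L).drop (i + 1 + 1) =
        l :: (L.take i ++ L.drop (i + 1)) := by
      simp [List.take_succ_cons, List.drop_succ_cons]
    rw [htd, join_cons _ _ ?hne, hs]
    case hne =>
      have h2 : L.length ≥ 2 := by omega
      intro hnil
      have hln := congrArg List.length hnil
      rw [List.length_append, List.length_take, List.length_drop] at hln
      simp only [List.length_nil] at hln
      omega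

theorem bBodyC_main : ∀ (n : Nat) (cs : List Char), cs.length = n →
    bBodyC cs = spliceBody (mySplit [] cs) := by
  intro n
  induction n using Nat.strong_induction_on with
  | _ n ih =>
  intro cs hlen
  by_cases hmem : '\n' ∈ cs
  · obtain ⟨l, r, rfl, hl⟩ := nl_decomp cs hmem
    rw [mySplit_append l hl [] r]
    simp only [List.reverse_nil, List.nil_append]
    by_cases hsl : ['#', ' '] <+: l
    · -- the first line is the header: B takes the startswith branch
      have hsw : PySem.Chars.startswith (l ++ '\n' :: r) ['#', ' '] = true :=
        (PySem.Chars.startswith_iff _ _).mpr ((startswith_append_nl l r hl).mpr hsl)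
      rw [bBodyC, if_pos hsw, find_nl l r hl]
      rw [if_neg (by omega : ¬((l.length : Int) = -1))]
      have hc : (l.length : Int) + 1 = ((l.length + 1 : Nat) : Int) := by push_cast; ring
      rw [hc, PySem.List.slice_from_natCast]
      have hd : (l ++ '\n' :: r).drop (l.length + 1) = r := by
        have h0 := drop_app_cons l r '\n' 0
        rwa [List.drop_zero] at h0
      rw [hd]
      rw [spliceBody, List.findIdx?_cons, (PySem.Chars.startswith_iff _ _).mpr hsl]
      rw [if_pos rfl]
      have hne1 : ¬((l :: mySplit [] r).length = 1) := by
        simp only [List.length_cons]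
        intro hcon
        exact mySplit_ne_nil [] r (List.length_eq_zero_iff.mp (by omega))
      dsimp only
      rw [if_neg hne1]
      simp only [List.take_zero, List.nil_append, List.drop_succ_cons, List.drop_zero]
      rw [ic_mySplit r []]
      simp
    · have hswf : PySem.Chars.startswith (l ++ '\n' :: r) ['#', ' '] = false := by
        rw [← Bool.not_eq_true, PySem.Chars.startswith_iff]
        exact fun hp => hsl ((startswith_append_nl l r hl).mp hp)
      have hPl : PySem.Chars.startswith l ['#', ' '] = false := by
        rw [← Bool.not_eq_true, PySem.Chars.startswith_iff]
        exact hsl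
      rw [bBodyC, hswf]
      simp only [Bool.false_eq_true, if_false]
      by_cases hsr : ['#', ' '] <+: r
      · -- the header is the first line of r
        rw [find_sub3_at l r hl hsr]
        rw [if_neg (by omega : ¬((l.length : Int) = -1))]
        have hc : (l.length : Int) + 1 = ((l.length + 1 : Nat) : Int) := by push_cast; ring
        rw [hc, PySem.Chars.findFrom_natCast _ _ (l.length + 1) (by simp only [List.length_append, List.length_cons]; omega)]
        have hd : (l ++ '\n' :: r).drop (l.length + 1) = r := by
          have h0 := drop_app_cons l r '\n' 0
          rwa [List.drop_zero] at h0
        rw [hd]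
        have htk : PySem.List.slice (l ++ '\n' :: r) none (some (l.length : Int)) = l := by
          rw [PySem.List.slice_to_natCast, List.take_left]
        by_cases hmr : '\n' ∈ r
        · obtain ⟨m, r', rfl, hm⟩ := nl_decomp r hmr
          have hsm : ['#', ' '] <+: m := (startswith_append_nl m r' hm).mp hsr
          rw [find_nl m r' hm]
          rw [if_neg (by omega : ¬((m.length : Int) = -1))]
          rw [if_neg (by omega : ¬((l.length + 1 : Nat) : Int) + m.length = -1)]
          have hck : ((l.length + 1 : Nat) : Int) + m.length = ((l.length + 1 + m.length : Nat) : Int) := by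
            push_cast; ring
          rw [hck, PySem.List.slice_from_natCast, htk]
          have hdk : (l ++ '\n' :: (m ++ '\n' :: r')).drop (l.length + 1 + m.length) =
              '\n' :: r' := by
            have h1 : l.length + 1 + m.length = l.length + (m.length + 1) := by omega
            rw [h1, drop_app_cons, List.drop_left]
          rw [hdk]
          rw [mySplit_append m hm [] r']
          simp only [List.reverse_nil, List.nil_append]
          rw [spliceBody, List.findIdx?_cons, hPl]
          simp only [Bool.false_eq_true, if_false]
          rw [List.findIdx?_cons, (PySem.Chars.startswith_iff _ _).mpr hsm]
          rw [if_pos rfl]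
          simp only [Option.map_some]
          have hne1 : ¬((l :: m :: mySplit [] r').length = 1) := by simp
          rw [if_neg hne1]
          simp only [List.take_succ_cons, List.take_zero, List.drop_succ_cons, List.drop_zero]
          rw [List.singleton_append, join_cons l _ (mySplit_ne_nil [] r'), ic_mySplit r' []]
          simp
        · rw [mySplit_free r hmr []]
          simp only [List.reverse_nil, List.nil_append]
          rw [find_nl_neg r hmr]
          rw [if_pos rfl, htk]
          rw [spliceBody, List.findIdx?_cons, hPl]
          simp only [Bool.false_eq_true, if_false]
          rw [List.findIdx?_cons, (PySem.Chars.startswith_iff _ _).mpr hsr]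
          rw [if_pos rfl]
          simp only [Option.map_some]
          rw [if_neg (by simp : ¬(([l, r] : List (List Char)).length = 1))]
          simp only [List.take_succ_cons, List.take_zero, List.drop_succ_cons, List.drop_zero]
          simp [PySem.Chars.join_singleton]
      · -- the header, if any, is deeper in r: use the induction hypothesis on r
        have hPr : PySem.Chars.startswith r ['#', ' '] = false := by
          rw [← Bool.not_eq_true, PySem.Chars.startswith_iff]
          exact hsr
        have hihr : bBodyC r = spliceBody (mySplit [] r) := by
          refine ih r.length ?_ r rfl
          subst hlen
          simp only [List.length_append, List.length_cons]
          omega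
        rw [find_sub3_shift l r hl hsr]
        by_cases hF : PySem.Chars.find r ['\n', '#', ' '] = -1
        · rw [if_pos hF, if_pos rfl]
          -- no header anywhere: findIdx? is none on all lines
          have hnone : (l :: mySplit [] r).findIdx?
              (fun l => PySem.Chars.startswith l ['#', ' ']) = none := by
            rw [List.findIdx?_eq_none_iff]
            intro p hp
            rcases List.mem_cons.mp hp with rfl | hp
            · exact hPl
            · rw [← Bool.not_eq_true, PySem.Chars.startswith_iff]
              exact parts_no_header r [] (by simpa using hsr)
                ((PySem.Chars.find_eq_neg_one_iff _ _).mp hF) p hp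
          rw [spliceBody, hnone]
          dsimp only
          rw [join_cons l _ (mySplit_ne_nil [] r), ic_mySplit r []]
          simp
        · rw [if_neg hF]
          have hnn : 0 ≤ PySem.Chars.find r ['\n', '#', ' '] := by
            have := PySem.Chars.neg_one_le_find r ['\n', '#', ' ']
            omega
          set f := (PySem.Chars.find r ['\n', '#', ' ']).toNat with hfdef
          have hfc : PySem.Chars.find r ['\n', '#', ' '] = (f : Int) := by omega
          obtain ⟨hp, hmin⟩ := PySem.Chars.find_spec hnn
          have hflt : f + 1 ≤ r.length := by
            have h3 := hp.length_le
            simp only [List.length_cons, List.length_drop] at h3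
            omega
          have hj : (l.length : Int) + 1 + PySem.Chars.find r ['\n', '#', ' '] =
              ((l.length + 1 + f : Nat) : Int) := by rw [hfc]; push_cast; ring
          rw [hj]
          rw [if_neg (by omega : ¬(((l.length + 1 + f : Nat) : Int) = -1))]
          have hjc : ((l.length + 1 + f : Nat) : Int) + 1 = ((l.length + 1 + f + 1 : Nat) : Int) := by
            push_cast; ring
          rw [hjc, PySem.Chars.findFrom_natCast _ _ (l.length + 1 + f + 1)
            (by subst hlen; simp only [List.length_append, List.length_cons]; omega)]
          have hdcs : (l ++ '\n' :: r).drop (l.length + 1 + f + 1) = r.drop (f + 1) := by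
            have h4 : l.length + 1 + f + 1 = l.length + ((f + 1) + 1) := by omega
            rw [h4, drop_app_cons]
          rw [hdcs]
          -- B's computation on r, in the same branch
          rw [bBodyC, hPr] at hihr
          simp only [Bool.false_eq_true, if_false] at hihr
          rw [if_neg hF, hfc] at hihr
          have hfc1 : (f : Int) + 1 = ((f + 1 : Nat) : Int) := by push_cast; ring
          rw [hfc1, PySem.Chars.findFrom_natCast _ _ (f + 1) hflt] at hihr
          have htkcs : PySem.List.slice (l ++ '\n' :: r) none (some ((l.length + 1 + f : Nat) : Int)) =
              l ++ '\n' :: r.take f := by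
            rw [PySem.List.slice_to_natCast, List.take_append]
            rw [List.take_of_length_le (by omega : l.length ≤ l.length + 1 + f)]
            have h6 : l.length + 1 + f - l.length = f + 1 := by omega
            rw [h6, List.take_succ_cons]
          by_cases hg : PySem.Chars.find (r.drop (f + 1)) ['\n'] = -1
          · rw [if_pos hg, if_pos rfl, htkcs]
            rw [if_pos hg, if_pos rfl] at hihr
            rw [PySem.List.slice_to_natCast] at hihr
            exact (spliceBody_cons l (mySplit [] r) (r.take f) hPl
              (mySplit_ne_nil [] r) hihr.symm).symm
          · have hgn : 0 ≤ PySem.Chars.find (r.drop (f + 1)) ['\n'] := by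
              have := PySem.Chars.neg_one_le_find (r.drop (f + 1)) ['\n']
              omega
            set g := (PySem.Chars.find (r.drop (f + 1)) ['\n']).toNat with hgdef
            have hgc : PySem.Chars.find (r.drop (f + 1)) ['\n'] = (g : Int) := by omega
            rw [if_neg hg, if_neg (by rw [hgc]; omega :
              ¬(((l.length + 1 + f + 1 : Nat) : Int) + PySem.Chars.find (r.drop (f + 1)) ['\n'] = -1))]
            rw [if_neg hg, if_neg (by rw [hgc]; omega :
              ¬(((f + 1 : Nat) : Int) + PySem.Chars.find (r.drop (f + 1)) ['\n'] = -1))] at hihr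
            have hkc : ((l.length + 1 + f + 1 : Nat) : Int) + PySem.Chars.find (r.drop (f + 1)) ['\n'] =
                ((l.length + 1 + f + 1 + g : Nat) : Int) := by rw [hgc]; push_cast; ring
            have hkc2 : ((f + 1 : Nat) : Int) + PySem.Chars.find (r.drop (f + 1)) ['\n'] =
                ((f + 1 + g : Nat) : Int) := by rw [hgc]; push_cast; ring
            rw [hkc, PySem.List.slice_from_natCast, htkcs]
            rw [hkc2, PySem.List.slice_from_natCast, PySem.List.slice_to_natCast] at hihr
            have hdrop2 : (l ++ '\n' :: r).drop (l.length + 1 + f + 1 + g) = r.drop (f + 1 + g) := by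
              have h5 : l.length + 1 + f + 1 + g = l.length + ((f + 1 + g) + 1) := by omega
              rw [h5, drop_app_cons]
            rw [hdrop2]
            have := spliceBody_cons l (mySplit [] r) (r.take f ++ r.drop (f + 1 + g)) hPl
              (mySplit_ne_nil [] r) hihr.symm
            rw [this]
            simp
  · -- no newline at all: a single line
    rw [mySplit_free cs hmem []]
    simp only [List.reverse_nil, List.nil_append]
    rw [bBodyC, spliceBody]
    by_cases hsw : PySem.Chars.startswith cs ['#', ' '] = true
    · rw [hsw, if_pos rfl, find_nl_neg cs hmem, if_pos rfl]
      rw [List.findIdx?_cons, hsw, if_pos rfl]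
      rfl
    · rw [Bool.not_eq_true] at hsw
      rw [hsw]
      simp only [Bool.false_eq_true, if_false]
      rw [find_sub3_neg_free cs hmem, if_pos rfl]
      rw [List.findIdx?_cons, hsw]
      simp only [Bool.false_eq_true, if_false, List.findIdx?_nil, Option.map_none]
      rw [PySem.Chars.join_singleton]

theorem bBodyC_eq_spliceBody (cs : List Char) : bBodyC cs = spliceBody (mySplit [] cs) :=
  bBodyC_main cs.length cs rfl

-- A-side: unroll the flag loop into find-first-index-and-splice form
theorem pvALoop_acc (ls : List String) (acc : List String) (b : Bool) :
    pvALoop ls acc b = acc ++ pvALoop ls [] b := by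
  induction ls generalizing acc b with
  | nil => simp [pvALoop]
  | cons l ls ih =>
    simp only [pvALoop]
    split_ifs with h
    · exact ih acc true
    · rw [ih (acc ++ [l]) b, ih ([] ++ [l]) b]; simp

theorem pvALoop_true (ls : List String) : pvALoop ls [] true = ls := by
  induction ls with
  | nil => rfl
  | cons l ls ih => simp only [pvALoop]; rw [if_neg (by simp), pvALoop_acc, ih]; simp

theorem pvALoop_eq_splice (ls : List String) :
    pvALoop ls [] false =
      match ls.findIdx? (fun l => PySem.Str.startswith l "# ") with
      | some i => ls.take i ++ ls.drop (i + 1)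
      | none => ls := by
  induction ls with
  | nil => rfl
  | cons l ls ih =>
    by_cases h : PySem.Str.startswith l "# " = true
    · have h2 : PySem.Chars.startswith l.toList ['#', ' '] = true := by simpa using h
      simp only [pvALoop]
      split_ifs with hc
      · rw [pvALoop_true, List.findIdx?_cons]
        simp [h2]
      · exact absurd ⟨h, trivial⟩ hc
    · simp only [Bool.not_eq_true] at h
      have h2 : PySem.Chars.startswith l.toList ['#', ' '] = false := by simpa using h
      simp only [pvALoop]
      split_ifs with hc
      · rw [h] at hc; exact absurd hc.1 (by simp)
      · rw [pvALoop_acc, ih, List.findIdx?_cons]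
        cases hf : ls.findIdx? (fun l => PySem.Str.startswith l "# ") with
        | none => simp [h2]
        | some i => simp [h2, List.take_succ_cons, List.drop_succ_cons]

-- assembly helpers
def spliceList (M : List (List Char)) : List (List Char) :=
  match M.findIdx? (fun l => PySem.Chars.startswith l ['#', ' ']) with
  | none => M
  | some i => M.take i ++ M.drop (i + 1)

theorem str_ofList_append (x y : List Char) :
    String.ofList x ++ String.ofList y = String.ofList (x ++ y) := by
  have h : (String.ofList x ++ String.ofList y).toList = x ++ y := by
    rw [String.toList_append, String.toList_ofList, String.toList_ofList]
  rw [← String.ofList_toList (s := String.ofList x ++ String.ofList y), h]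

theorem split_bridge (content : String) :
    (PySem.Str.split? content "\n").getD [] = (mySplit [] content.toList).map String.ofList := by
  rw [PySem.Str.split?, PySem.Chars.split?]
  rw [if_neg (by decide : ¬(("\n".toList).isEmpty = true))]
  have : "\n".toList = ['\n'] := rfl
  rw [this, splitOn_eq]
  rfl

theorem findIdx_bridge (M : List (List Char)) :
    (M.map String.ofList).findIdx? (fun l => PySem.Str.startswith l "# ")
      = M.findIdx? (fun l => PySem.Chars.startswith l ['#', ' ']) := by
  rw [List.findIdx?_map]
  congr 1
  funext l
  show PySem.Str.startswith (String.ofList l) "# " = _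
  rw [PySem.Str.startswith_eq, String.toList_ofList]
  rfl

-- A's value as a join over the spliced char-level line list
theorem a_side (content : String) (abstract_content : String) :
    adjust_software_header_levels content abstract_content =
      PySem.Str.join "\n"
        ((if abstract_content ≠ "" then ["## Abstract", "", abstract_content, ""] else []) ++
          (spliceList (mySplit [] content.toList)).map String.ofList) := by
  rw [adjust_software_header_levels]
  rw [split_bridge, pvALoop_acc, pvALoop_eq_splice, findIdx_bridge, spliceList]
  cases hfi : (mySplit [] content.toList).findIdx? (fun l => PySem.Chars.startswith l ['#', ' ']) with
  | none => rfl
  | some i =>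
    dsimp only
    simp only [List.map_append, List.map_take, List.map_drop]

-- B's value via the char-level body computation
theorem b_side (content : String) (abstract_content : String) :
    adjust_software_header_levels_alt content abstract_content =
      (match bBodyC content.toList with
       | none => if abstract_content ≠ "" then "## Abstract\n\n" ++ abstract_content ++ "\n" else ""
       | some X =>
         if (if abstract_content ≠ "" then "## Abstract\n\n" ++ abstract_content ++ "\n" else "") ≠ "" then
           (if abstract_content ≠ "" then "## Abstract\n\n" ++ abstract_content ++ "\n" else "") ++ "\n" ++ String.ofList X
         else String.ofList X) := by
  rw [adjust_software_header_levels_alt, bBodyC]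
  have hsw : PySem.Str.startswith content "# " = PySem.Chars.startswith content.toList ['#', ' '] := by
    rw [PySem.Str.startswith_eq]; rfl
  have hfd : PySem.Str.find content "\n" = PySem.Chars.find content.toList ['\n'] := rfl
  have hfd3 : PySem.Str.find content "\n# " = PySem.Chars.find content.toList ['\n', '#', ' '] := rfl
  rw [hsw, hfd, hfd3]
  by_cases h1 : PySem.Chars.startswith content.toList ['#', ' '] = true
  · rw [h1]
    simp only [if_true]
    by_cases h2 : PySem.Chars.find content.toList ['\n'] = -1
    · rw [if_pos h2, if_pos h2]
    · rw [if_neg h2, if_neg h2]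
      rw [PySem.Str.slice]
      rw [PySem.Chars.slice_eq_listSlice]
  · rw [Bool.not_eq_true] at h1
    rw [h1]
    simp only [Bool.false_eq_true, if_false]
    by_cases h3 : PySem.Chars.find content.toList ['\n', '#', ' '] = -1
    · rw [if_pos h3, if_pos h3]
      dsimp only
      rw [String.ofList_toList]
    · rw [if_neg h3, if_neg h3]
      have hff : PySem.Str.findFrom content "\n" (PySem.Chars.find content.toList ['\n', '#', ' '] + 1) none
          = PySem.Chars.findFrom content.toList ['\n'] (PySem.Chars.find content.toList ['\n', '#', ' '] + 1) none := by
        rw [PySem.Str.findFrom_eq]; rfl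
      rw [hff]
      by_cases h4 : PySem.Chars.findFrom content.toList ['\n'] (PySem.Chars.find content.toList ['\n', '#', ' '] + 1) none = -1
      · rw [if_pos h4, if_pos h4, PySem.Str.slice, PySem.Chars.slice_eq_listSlice]
      · rw [if_neg h4, if_neg h4, PySem.Str.slice, PySem.Str.slice, PySem.Chars.slice_eq_listSlice,
          PySem.Chars.slice_eq_listSlice, str_ofList_append]

-- spliceBody in terms of spliceList
theorem spliceBody_none_iff (M : List (List Char)) (hM : M ≠ []) :
    spliceBody M = none → spliceList M = [] ∧ M.length = 1 := by
  rw [spliceBody, spliceList]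
  cases hfi : M.findIdx? (fun l => PySem.Chars.startswith l ['#', ' ']) with
  | none => intro h; simp at h
  | some i =>
    dsimp only
    by_cases hlen : M.length = 1
    · rw [if_pos hlen]
      intro _
      have hi : i < M.length := (List.findIdx?_eq_some_iff_findIdx_eq.mp hfi).1
      have hi0 : i = 0 := by omega
      subst hi0
      refine ⟨?_, hlen⟩
      match M, hlen with
      | [x], _ => rfl
    · rw [if_neg hlen]; intro h; simp at h

theorem spliceBody_some (M : List (List Char)) (hM : M ≠ []) (X : List Char)
    (h : spliceBody M = some X) :
    X = PySem.Chars.join ['\n'] (spliceList M) ∧ spliceList M ≠ [] := by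
  rw [spliceBody] at h
  rw [spliceList]
  cases hfi : M.findIdx? (fun l => PySem.Chars.startswith l ['#', ' ']) with
  | none =>
    rw [hfi] at h
    dsimp only at h ⊢
    injection h with h
    exact ⟨h.symm, hM⟩
  | some i =>
    rw [hfi] at h
    dsimp only at h ⊢
    by_cases hlen : M.length = 1
    · rw [if_pos hlen] at h; simp at h
    · rw [if_neg hlen] at h
      injection h with h
      refine ⟨h.symm, ?_⟩
      have hi : i < M.length := (List.findIdx?_eq_some_iff_findIdx_eq.mp hfi).1
      intro hnil
      have hln := congrArg List.length hnil
      rw [List.length_append, List.length_take, List.length_drop] at hln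
      simp only [List.length_nil] at hln
      have : M.length ≠ 0 := fun h0 => hM (List.length_eq_zero_iff.mp h0)
      omega

theorem join_map_ofList (SL : List (List Char)) :
    PySem.Str.join "\n" (SL.map String.ofList) = String.ofList (PySem.Chars.join ['\n'] SL) := by
  rw [PySem.Str.join]
  congr 1
  rw [List.map_map]
  have : (String.toList ∘ String.ofList) = id := by
    funext l; exact String.toList_ofList
  rw [this, List.map_id]
  rfl

theorem join_pre_append (a : String) (SL : List (List Char)) (hSL : SL ≠ []) :
    PySem.Str.join "\n" (["## Abstract", "", a, ""] ++ SL.map String.ofList) =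
      ("## Abstract\n\n" ++ a ++ "\n") ++ "\n" ++ String.ofList (PySem.Chars.join ['\n'] SL) := by
  rw [← String.ofList_toList (s := ("## Abstract\n\n" ++ a ++ "\n") ++ "\n" ++ String.ofList (PySem.Chars.join ['\n'] SL))]
  rw [PySem.Str.join]
  congr 1
  simp only [List.map_append, List.map_cons, List.map_nil, List.map_map]
  have hmm : (String.toList ∘ String.ofList) = id := by
    funext l; exact String.toList_ofList
  rw [hmm, List.map_id]
  have h1 : "\n".toList = ['\n'] := rfl
  rw [h1]
  simp only [List.cons_append, List.nil_append]
  rw [join_cons _ _ (by simp), join_cons _ _ (by simp), join_cons _ _ (by simp),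
      join_cons _ _ hSL]
  simp only [String.toList_append, String.toList_ofList]
  have h2 : "## Abstract\n\n".toList = "## Abstract".toList ++ ['\n', '\n'] := by decide
  have h3 : "".toList = ([] : List Char) := rfl
  rw [h2, h3]
  simp

theorem join_pre_only (a : String) :
    PySem.Str.join "\n" ["## Abstract", "", a, ""] = "## Abstract\n\n" ++ a ++ "\n" := by
  rw [← String.ofList_toList (s := "## Abstract\n\n" ++ a ++ "\n")]
  rw [PySem.Str.join]
  congr 1
  simp only [List.map_cons, List.map_nil]
  have h1 : "\n".toList = ['\n'] := rfl
  rw [h1]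
  rw [join_cons _ _ (by simp), join_cons _ _ (by simp), join_cons _ _ (by simp),
      PySem.Chars.join_singleton]
  simp only [String.toList_append]
  have h2 : "## Abstract\n\n".toList = "## Abstract".toList ++ ['\n', '\n'] := by decide
  have h3 : "".toList = ([] : List Char) := rfl
  rw [h2, h3]
  simp

theorem pfx_ne (a : String) : ("## Abstract\n\n" ++ a ++ "\n") ≠ "" := by
  intro h
  have := congrArg String.toList h
  simp only [String.toList_append] at this
  have h2 : ("" : String).toList = [] := rfl
  rw [h2] at this
  exact absurd (List.append_eq_nil_iff.mp this).2 (by decide)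

-- ===== VERDICT (by name: the statement is the Claim_ definition above) =====
theorem adjust_software_header_levels_spec : Claim_equal_adjust_software_header_levels := by
  intro content abstract_content _
  unfold Spec_adjust_software_header_levels
  rw [a_side, b_side, bBodyC_eq_spliceBody]
  have hM : mySplit [] content.toList ≠ [] := mySplit_ne_nil [] content.toList
  cases hsb : spliceBody (mySplit [] content.toList) with
  | none =>
    obtain ⟨hsl, _⟩ := spliceBody_none_iff _ hM hsb
    rw [hsl]
    dsimp only
    by_cases ha : abstract_content ≠ ""
    · rw [if_pos ha, if_pos ha]
      simpa using join_pre_only abstract_content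
    · rw [if_neg ha, if_neg ha]
      rfl
  | some X =>
    obtain ⟨hX, hne⟩ := spliceBody_some _ hM X hsb
    subst hX
    dsimp only
    by_cases ha : abstract_content ≠ ""
    · rw [if_pos ha, if_pos ha, if_pos (pfx_ne abstract_content)]
      exact join_pre_append abstract_content _ hne
    · rw [if_neg ha, if_neg ha, if_neg (by simp)]
      simpa using join_map_ofList (spliceList (mySplit [] content.toList))
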